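-- pv_equiv track=rewrite | github.com/SmashingBumpkin/Python | 37/program.py | es37
-- ===== SOURCE A (Python) =====
-- def es37(dictionariesList):
--     '''Write the function es37(dictionariesList) that takes as an input a
--     list of dictionaries and returns a dictionary.
--
--     The input dictionaries in dictionariesList have character strings
--     between 'a' and 'z' as keys and lists of integers as attributes.
--
--     The output dictionary has as keys the keys common to at least half
--     of the dictionaries of the input list.  Each x key of this output
--     dictionary is associated with a set.  An integer is present in the
--     set with key x if and only if it is present in the attribute list
--     of key x for at least one dictionary in dictionariesList.
--
--     For example:
--     - if dictionariesList contains the three dictionaries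
--     {'a': [1,3,5],'b':[2,3 ],'d':[3]},
--     {'a':[5,1,2,3], 'b':[2],'d':[3]},
--     {'a':[3,5], 'c':[4,1,2],'d':[4]}
--     the returned dictionary will be
--     {'a':{1,2,3,5},'b':{2,3},'d':{3,4}}
--
--
--     '''
--     dicOut = {}
--     for element in dictionariesList:
--         for key in element.keys():
--             dicOut[key] = dicOut.get(key,0) + 1
--
--     minFreq = int((len(dictionariesList)/2)+0.5)
--
--     tempDic = dicOut.copy()
--
--     for key, value in tempDic.items():
--         if value < minFreq:
--             dicOut.pop(key)
--         else:
--             dicOut[key] = set()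
--
--     #iterate through dictionaries in list
--     for dick in dictionariesList:
--         for key, value in dick.items():
--             try:
--                 dicOut[key] = dicOut[key].union(set(value))
--             except KeyError:
--                 pass
--
--     return dicOut
-- ===== SOURCE B (Python) =====
-- def es37(dictionariesList):
--     acc = {}
--     for dic in dictionariesList:
--         for key, value in dic.items():
--             count, union = acc.setdefault(key, (0, set()))
--             acc[key] = (count + 1, union | set(value))
--     minFreq = int((len(dictionariesList) / 2) + 0.5)
--     return {k: v[1] for k, v in acc.items() if v[0] >= minFreq}
-- ===== Notes on version B (the rewrite author's own statement) =====
-- stated objective: simpler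
-- what changed: A's three passes over two dicts (count key frequencies, prune-and-reset survivors to set(), re-scan all dicts unioning with a try/except) are collapsed into one accumulation pass keeping a (count, running-union) pair per key, followed by a single filter that keeps keys reaching minFreq.
import Mathlib
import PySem

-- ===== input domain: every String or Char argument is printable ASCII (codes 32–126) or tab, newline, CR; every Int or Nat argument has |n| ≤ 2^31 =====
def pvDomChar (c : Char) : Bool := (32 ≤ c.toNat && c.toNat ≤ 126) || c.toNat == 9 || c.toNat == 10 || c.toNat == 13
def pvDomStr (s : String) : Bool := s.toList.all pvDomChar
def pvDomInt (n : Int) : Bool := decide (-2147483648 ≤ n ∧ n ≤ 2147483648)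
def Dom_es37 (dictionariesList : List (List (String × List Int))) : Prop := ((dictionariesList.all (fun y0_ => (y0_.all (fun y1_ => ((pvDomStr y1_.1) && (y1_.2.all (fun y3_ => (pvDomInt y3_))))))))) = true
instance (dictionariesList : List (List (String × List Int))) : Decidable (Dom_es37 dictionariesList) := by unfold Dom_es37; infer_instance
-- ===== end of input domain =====

-- B replaces A's three passes (count keys / prune-and-reset to set() / re-scan unioning) by one
-- accumulation pass keeping (count, running union) per key plus a final filter: simpler, same cost.

-- ===== PORT A =====
-- A (three passes): count in how many dicts each key occurs; drop keys below minFreq and reset the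
-- kept ones to set() (pop keeps order, assignment keeps position, so the surviving dict is the
-- filtered items in order — the value type changes int→set, hence a fresh Dict of the new type);
-- then union in every attribute list, 'except KeyError: pass' being the get? = none branch.
def es37 (dictionariesList : List (List (String × List Int))) : List (String × List Int) :=
  let dicOut : PySem.Dict String Int :=
    dictionariesList.foldl (fun d element =>
      (PySem.Dict.ofList element).keys.foldl
        (fun d key => d.insert key (d.getD key 0 + 1)) d)
      PySem.Dict.empty
  -- minFreq = int((len/2)+0.5): n/2 and +0.5 are exact in binary floating point for any list
  -- length and int() truncates, so this is exactly (n+1)//2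
  let minFreq : Int := ((dictionariesList.length + 1) / 2 : Nat)
  let dicOut2 : PySem.Dict String (PySem.Set Int) :=
    dicOut.items.foldl
      (fun d kv => if kv.2 < minFreq then d else d.insert kv.1 PySem.Set.empty)
      PySem.Dict.empty
  let dicOut3 : PySem.Dict String (PySem.Set Int) :=
    dictionariesList.foldl (fun d dick =>
      (PySem.Dict.ofList dick).items.foldl
        (fun d kv =>
          match d.get? kv.1 with
          | some s => d.insert kv.1 (PySem.Set.union s kv.2)
          | none => d) d) dicOut2
  dicOut3.items

-- ===== PORT B =====
-- B (one pass + filter): acc[key] = (count+1, union | set(value)) for every item of every dict,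
-- then keep v[1] for the keys whose count reaches minFreq.
def es37_alt (dictionariesList : List (List (String × List Int))) : List (String × List Int) :=
  let acc : PySem.Dict String (Int × PySem.Set Int) :=
    dictionariesList.foldl (fun a dic =>
      (PySem.Dict.ofList dic).items.foldl
        (fun a kv => a.modify kv.1 (0, PySem.Set.empty)
          (fun cu => (cu.1 + 1, PySem.Set.union cu.2 kv.2))) a)
      PySem.Dict.empty
  -- minFreq = int((len/2)+0.5) = (n+1)//2 exactly, as in A
  let minFreq : Int := ((dictionariesList.length + 1) / 2 : Nat)
  (acc.items.filter (fun p => minFreq ≤ p.2.1)).map (fun p => (p.1, p.2.2))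

-- ===== PRECONDITION & SPEC =====
def Spec_es37 (dictionariesList : List (List (String × List Int))) (out : List (String × List Int)) : Prop := out = es37_alt dictionariesList
instance (dictionariesList : List (List (String × List Int))) (out : List (String × List Int)) : Decidable (Spec_es37 dictionariesList out) := by unfold Spec_es37; infer_instance

-- ===== CLAIM (what is proved, stated in full; the proofs are below) =====
def Claim_equal_es37 : Prop := ∀ (dictionariesList : List (List (String × List Int))), Dom_es37 dictionariesList → Spec_es37 dictionariesList (es37 dictionariesList)

-- ===== LEMMAS AND PROOFS =====

lemma accB_getD (ps : List (String × List Int)) (d : PySem.Dict String (Int × PySem.Set Int)) (k : String) :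
    (ps.foldl (fun a kv => a.modify kv.1 (0, PySem.Set.empty)
        (fun cu => (cu.1 + 1, PySem.Set.union cu.2 kv.2))) d).getD k (0, PySem.Set.empty)
    = ((d.getD k (0, PySem.Set.empty)).1 + ((ps.map (·.1)).count k : Int),
       (ps.filter (fun p => p.1 == k)).foldl (fun s p => PySem.Set.union s p.2)
         (d.getD k (0, PySem.Set.empty)).2) := by
  induction ps generalizing d with
  | nil => simp
  | cons h t ih =>
    simp only [List.foldl_cons, ih, PySem.Dict.getD_modify, List.map_cons, List.filter_cons,
      List.count_cons]
    by_cases hk : k = h.1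
    · simp [hk]
      ring
    · have hb : (h.1 == k) = false := by simp; exact fun e => hk e.symm
      simp [hk, hb]

def pvPairs (L : List (List (String × List Int))) : List (String × List Int) :=
  L.flatMap (fun dic => (PySem.Dict.ofList dic).items)

def pvU (ps : List (String × List Int)) (k : String) : PySem.Set Int :=
  (ps.filter (fun p => p.1 == k)).foldl (fun s p => PySem.Set.union s p.2) PySem.Set.empty

lemma foldl_flatMap {α β γ : Type} (l : List α) (g : α → List β) (f : γ → β → γ) (i : γ) :
    (l.flatMap g).foldl f i = l.foldl (fun a x => List.foldl f a (g x)) i := by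
  induction l generalizing i with
  | nil => rfl
  | cons h t ih => simp [List.foldl_append, ih]

lemma accB_items (ps : List (String × List Int)) :
    (ps.foldl (fun a kv => a.modify kv.1 (0, PySem.Set.empty)
        (fun cu => (cu.1 + 1, PySem.Set.union cu.2 kv.2)))
      (PySem.Dict.empty : PySem.Dict String (Int × PySem.Set Int))).items
    = (PySem.Set.ofList (ps.map (·.1))).map
        (fun k => (k, (((ps.map (·.1)).count k : Int), pvU ps k))) := by
  set acc := ps.foldl (fun a kv => a.modify kv.1 (0, PySem.Set.empty)
          (fun cu => (cu.1 + 1, PySem.Set.union cu.2 kv.2)))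
      (PySem.Dict.empty : PySem.Dict String (Int × PySem.Set Int)) with hacc
  have hnd : acc.keys.Nodup := by
    rw [hacc]
    exact PySem.Dict.nodup_keys_foldl_modify_key ps (·.1) (0, PySem.Set.empty)
      (fun _ kv => fun cu => (cu.1 + 1, PySem.Set.union cu.2 kv.2)) _ PySem.Dict.nodup_keys_empty
  have hkeys : acc.keys = PySem.Set.ofList (ps.map (·.1)) := by
    rw [hacc, PySem.Dict.keys_foldl_modify_key]
    rfl
  have hg : ∀ k, acc.getD k (0, PySem.Set.empty)
      = (((ps.map (·.1)).count k : Int), pvU ps k) := by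
    intro k
    rw [hacc, accB_getD]
    simp [pvU]
  rw [PySem.Dict.items_eq_map_keys acc hnd (0, PySem.Set.empty), hkeys]
  simp only [hg]

lemma es37_alt_eq : ∀ L, es37_alt L =
    ((PySem.Set.ofList ((pvPairs L).map (·.1))).filter
      (fun k => decide ((((L.length + 1) / 2 : Nat) : Int) ≤ ((pvPairs L).map (·.1)).count k))).map
      (fun k => (k, pvU (pvPairs L) k)) := by
  intro L
  simp only [es37_alt]
  have h2 := accB_items (pvPairs L)
  rw [pvPairs, foldl_flatMap] at h2
  rw [h2, List.filter_map, List.map_map]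
  simp [Function.comp_def, pvPairs]

lemma cA_items (ks : List String) :
    ((ks.foldl (fun d k => d.insert k (d.getD k 0 + 1))
        (PySem.Dict.empty : PySem.Dict String Int))).items
    = (PySem.Set.ofList ks).map (fun k => (k, (ks.count k : Int))) := by
  set cA := ks.foldl (fun d k => d.insert k (d.getD k 0 + 1))
      (PySem.Dict.empty : PySem.Dict String Int) with hcA
  have hnd : cA.keys.Nodup := by
    rw [hcA]
    exact PySem.Dict.nodup_keys_foldl_insert ks _ _ PySem.Dict.nodup_keys_empty
  have hkeys : cA.keys = PySem.Set.ofList ks := by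
    rw [hcA, PySem.Dict.keys_foldl_insert]
    rfl
  have hg : ∀ k, cA.getD k 0 = (ks.count k : Int) := by
    intro k
    rw [hcA, PySem.Dict.getD_foldl_insert_add_one]
    simp
  rw [PySem.Dict.items_eq_map_keys cA hnd 0, hkeys]
  simp only [hg]

lemma phase2_items (its : List (String × Int)) (m : Int) (hnd : (its.map (·.1)).Nodup) :
    (its.foldl (fun d kv => if kv.2 < m then d else d.insert kv.1 PySem.Set.empty)
       (PySem.Dict.empty : PySem.Dict String (PySem.Set Int))).items
    = (its.filter (fun kv => decide (m ≤ kv.2))).map (fun kv => (kv.1, PySem.Set.empty)) := by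
  have hfun : (fun (d : PySem.Dict String (PySem.Set Int)) (kv : String × Int) =>
      if kv.2 < m then d else d.insert kv.1 PySem.Set.empty)
      = (fun d kv => if m ≤ kv.2 then d.insert kv.1 PySem.Set.empty else d) := by
    funext d kv
    by_cases h : kv.2 < m
    · simp [h, not_le.mpr h]
    · simp [h, not_lt.mp h]
  rw [hfun, PySem.List.foldl_ite_eq_foldl_filter]
  have hsub : ((its.filter (fun kv => decide (m ≤ kv.2))).map (·.1)).Sublist (its.map (·.1)) :=
    List.Sublist.map _ List.filter_sublist
  rw [PySem.Dict.items_foldl_insert_fresh (its.filter (fun kv => decide (m ≤ kv.2))) (·.1)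
        (fun _ => PySem.Set.empty) PySem.Dict.empty
        (fun a _ => PySem.Dict.contains_empty a.1) (List.Nodup.sublist hsub hnd)]
  simp [PySem.Dict.empty]

lemma phase3_items (ps : List (String × List Int)) (d : PySem.Dict String (PySem.Set Int))
    (hnd : d.keys.Nodup) :
    (ps.foldl (fun d kv =>
        match d.get? kv.1 with
        | some s => d.insert kv.1 (PySem.Set.union s kv.2)
        | none => d) d).items
    = d.items.map (fun kv => (kv.1,
        (ps.filter (fun p => p.1 == kv.1)).foldl (fun s p => PySem.Set.union s p.2) kv.2)) := by
  induction ps generalizing d with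
  | nil => simp
  | cons p t ih =>
    rw [List.foldl_cons]
    cases hp : d.get? p.1 with
    | none =>
      rw [ih d hnd]
      apply List.map_congr_left
      intro kv hkv
      have h1 : kv.1 ∈ d.keys := PySem.Dict.mem_keys_of_mem_items _ hkv
      have h2 : p.1 ∉ d.keys := by
        rw [← PySem.Dict.get?_eq_none_iff_not_mem_keys]
        exact hp
      have hne : (p.1 == kv.1) = false := by
        simp
        intro e; exact h2 (e ▸ h1)
      simp [hne]
    | some s =>
      have hc : d.contains p.1 = true := by
        rw [PySem.Dict.contains_eq_isSome_get?, hp]; rfl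
      have hk' : (d.insert p.1 (PySem.Set.union s p.2)).keys = d.keys :=
        PySem.Dict.keys_insert_of_contains _ _ hc
      have hnd' : (d.insert p.1 (PySem.Set.union s p.2)).keys.Nodup := by
        rw [hk']; exact hnd
      rw [ih _ hnd', PySem.Dict.items_insert_of_contains _ _ hc, List.map_map]
      apply List.map_congr_left
      intro kv hkv
      obtain ⟨k1, v1⟩ := kv
      by_cases hq : k1 = p.1
      · have hv : v1 = s := by
          have := PySem.Dict.get?_of_mem_items d hkv hnd
          rw [hq] at this
          rw [hp] at this
          exact (Option.some_injective _ this).symm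
        have hb : (k1 == p.1) = true := by simp [hq]
        have hb2 : (p.1 == k1) = true := by simp [hq]
        simp only [Function.comp_apply, hb, if_pos, List.filter_cons, hb2]
        simp [hq, hv]
      · have hb : (k1 == p.1) = false := by simp [hq]
        have hb2 : (p.1 == k1) = false := by simp; intro e; exact hq e.symm
        simp only [Function.comp_apply, hb, List.filter_cons, hb2]
        simp

lemma es37_eq : ∀ L, es37 L =
    ((PySem.Set.ofList ((pvPairs L).map (·.1))).filter
      (fun k => decide ((((L.length + 1) / 2 : Nat) : Int) ≤ ((pvPairs L).map (·.1)).count k))).map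
      (fun k => (k, pvU (pvPairs L) k)) := by
  intro L
  simp only [es37, pvPairs, pvU]
  have h1 : (L.foldl (fun d element =>
      (PySem.Dict.ofList element).keys.foldl
        (fun d key => d.insert key (d.getD key 0 + 1)) d)
      PySem.Dict.empty)
      = (((L.flatMap (fun dic => (PySem.Dict.ofList dic).items)).map (·.1)).foldl
          (fun d k => d.insert k (d.getD k 0 + 1))
          (PySem.Dict.empty : PySem.Dict String Int)) := by
    simp only [PySem.Dict.keys, List.foldl_map, foldl_flatMap]
  rw [h1, cA_items]
  have hnd2 : ((((PySem.Set.ofList ((L.flatMap (fun dic => (PySem.Dict.ofList dic).items)).map (·.1))).map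
      (fun k => (k, (((L.flatMap (fun dic => (PySem.Dict.ofList dic).items)).map (·.1)).count k : Int)))).map (·.1))).Nodup := by
    simp only [List.map_map, Function.comp_def, List.map_id']
    exact PySem.Set.nodup_ofList ((L.flatMap (fun dic => (PySem.Dict.ofList dic).items)).map (·.1))
  have hd2items := phase2_items
      ((PySem.Set.ofList ((L.flatMap (fun dic => (PySem.Dict.ofList dic).items)).map (·.1))).map
        (fun k => (k, (((L.flatMap (fun dic => (PySem.Dict.ofList dic).items)).map (·.1)).count k : Int))))
      (((L.length + 1) / 2 : Nat) : Int) hnd2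
  have hd2nd : ((((PySem.Set.ofList ((L.flatMap (fun dic => (PySem.Dict.ofList dic).items)).map (·.1))).map
      (fun k => (k, (((L.flatMap (fun dic => (PySem.Dict.ofList dic).items)).map (·.1)).count k : Int)))).foldl
        (fun d kv => if kv.2 < (((L.length + 1) / 2 : Nat) : Int) then d
          else d.insert kv.1 PySem.Set.empty)
        (PySem.Dict.empty : PySem.Dict String (PySem.Set Int))).keys).Nodup := by
    simp only [PySem.Dict.keys, hd2items, List.map_map, Function.comp_def]
    exact List.Nodup.sublist (List.Sublist.map _ List.filter_sublist)
      (by simp only [List.map_map, Function.comp_def] at hnd2 ⊢; exact hnd2)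
  have h3 := phase3_items (L.flatMap (fun dic => (PySem.Dict.ofList dic).items)) _ hd2nd
  rw [foldl_flatMap] at h3
  rw [h3, hd2items, List.map_map, List.filter_map, List.map_map]
  simp [Function.comp_def]

-- ===== VERDICT (by name: the statement is the Claim_ definition above) =====
theorem es37_spec : Claim_equal_es37 := by
  intro L _
  unfold Spec_es37
  rw [es37_eq, es37_alt_eq]
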